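-- pv_equiv track=rewrite | github.com/titanscouting/tra-superscript | src/cli/processing.py | pitloop
-- ===== SOURCE A (Python) =====
-- def pitloop(client, competition, pit, tests):
--
-- 	return_vector = {}
-- 	for team in pit:
-- 		for variable in pit[team]:
-- 			if variable in tests:
-- 				if not variable in return_vector:
-- 					return_vector[variable] = []
-- 				return_vector[variable].append(pit[team][variable])
--
-- 	return return_vector
-- ===== SOURCE B (Python) =====
-- def pitloop(client, competition, pit, tests):
-- 	order = list(dict.fromkeys(v for team in pit for v in pit[team] if v in tests))
-- 	return {var: [val for team in pit
-- 	              for v, val in pit[team].items() if v == var]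
-- 	        for var in order}
-- ===== Notes on version B (the rewrite author's own statement) =====
-- stated objective: alternative
-- what changed: Instead of one pass that mutates a dict entry-by-entry, B first computes the ordered distinct variables that pass the tests filter, then builds the result with one gathering scan per variable (a two-phase group-by).
import Mathlib
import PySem

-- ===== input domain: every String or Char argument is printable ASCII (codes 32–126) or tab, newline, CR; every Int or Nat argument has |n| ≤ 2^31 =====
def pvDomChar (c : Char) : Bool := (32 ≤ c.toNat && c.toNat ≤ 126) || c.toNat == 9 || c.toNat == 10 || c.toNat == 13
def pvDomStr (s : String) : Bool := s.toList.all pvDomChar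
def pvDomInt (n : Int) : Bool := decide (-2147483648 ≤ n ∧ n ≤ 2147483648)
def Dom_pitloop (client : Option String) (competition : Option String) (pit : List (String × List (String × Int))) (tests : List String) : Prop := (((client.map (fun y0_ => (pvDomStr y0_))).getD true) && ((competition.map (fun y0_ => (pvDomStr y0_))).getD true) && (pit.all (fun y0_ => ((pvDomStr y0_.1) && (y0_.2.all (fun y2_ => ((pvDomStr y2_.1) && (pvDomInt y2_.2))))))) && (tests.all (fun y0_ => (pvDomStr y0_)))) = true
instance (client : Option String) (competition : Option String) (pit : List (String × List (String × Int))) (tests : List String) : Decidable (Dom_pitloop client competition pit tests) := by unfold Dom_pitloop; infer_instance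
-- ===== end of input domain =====

-- B replaces A's single pass that mutates a dict entry-by-entry with a two-phase group-by
-- (ordered distinct relevant variables first, then one gathering scan per variable); objective: alternative.

-- ===== PORT A =====
def pitloop (client : Option String) (competition : Option String) (pit : List (String × List (String × Int))) (tests : List String) : List (String × List Int) :=
  -- return_vector = {}; for team in pit: for variable in pit[team]: …
  let rv : PySem.Dict String (List Int) :=
    pit.foldl (fun rv team =>
      team.2.foldl (fun rv p =>
        if p.1 ∈ tests then
          ((if rv.contains p.1 = false then rv.insert p.1 [] else rv).modify p.1 [] (fun l => l ++ [p.2]))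
        else rv) rv) PySem.Dict.empty
  rv.items

-- ===== PORT B =====
def pitloop_alt (client : Option String) (competition : Option String) (pit : List (String × List (String × Int))) (tests : List String) : List (String × List Int) :=
  -- order = list(dict.fromkeys(v for team in pit for v in pit[team] if v in tests))
  let order : List String :=
    PySem.List.dedup ((pit.flatMap (fun t => t.2.map Prod.fst)).filter (fun v => decide (v ∈ tests)))
  -- {var: [val for team in pit for v, val in pit[team].items() if v == var] for var in order}
  order.map (fun var => (var, ((pit.flatMap (fun t => t.2)).filter (fun p => p.1 == var)).map Prod.snd))

-- ===== PRECONDITION & SPEC =====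
def Spec_pitloop (client : Option String) (competition : Option String) (pit : List (String × List (String × Int))) (tests : List String) (out : List (String × List Int)) : Prop := out = pitloop_alt client competition pit tests
instance (client : Option String) (competition : Option String) (pit : List (String × List (String × Int))) (tests : List String) (out : List (String × List Int)) : Decidable (Spec_pitloop client competition pit tests out) := by unfold Spec_pitloop; infer_instance

-- ===== CLAIM (what is proved, stated in full; the proofs are below) =====
def Claim_equal_pitloop : Prop := ∀ (client : Option String) (competition : Option String) (pit : List (String × List (String × Int))) (tests : List String), Dom_pitloop client competition pit tests → Spec_pitloop client competition pit tests (pitloop client competition pit tests)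

-- ===== LEMMAS AND PROOFS =====

-- A's inner loop body, as a step function over the flattened (variable, value) stream
def pvStep (tests : List String) (rv : PySem.Dict String (List Int)) (p : String × Int) : PySem.Dict String (List Int) :=
  if p.1 ∈ tests then
    ((if rv.contains p.1 = false then rv.insert p.1 [] else rv).modify p.1 [] (fun l => l ++ [p.2]))
  else rv

def pvKeys (tests : List String) (ps : List (String × Int)) : List String :=
  PySem.List.dedup ((ps.map Prod.fst).filter (fun v => decide (v ∈ tests)))

def pvGather (ps : List (String × Int)) (k : String) : List Int :=
  (ps.filter (fun p => p.1 == k)).map Prod.snd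

lemma pv_foldl_flatMap {α β γ : Type} (f : α → List β) (g : γ → β → γ) (i : γ) (xs : List α) :
    (xs.flatMap f).foldl g i = xs.foldl (fun a x => (f x).foldl g a) i := by
  induction xs generalizing i with
  | nil => rfl
  | cons x xs ih => simp [List.flatMap_cons, List.foldl_append, ih]

lemma pv_dedup_append_singleton {α : Type} [BEq α] (xs : List α) (x : α) :
    PySem.List.dedup (xs ++ [x]) =
      if (PySem.List.dedup xs).contains x then PySem.List.dedup xs else PySem.List.dedup xs ++ [x] := by
  simp [PySem.List.dedup, PySem.Set.ofList_eq_foldl, List.foldl_append, PySem.Set.add]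

lemma pv_keys_append (tests : List String) (qs : List (String × Int)) (p : String × Int) :
    pvKeys tests (qs ++ [p]) =
      if p.1 ∈ tests then
        (if (pvKeys tests qs).contains p.1 then pvKeys tests qs else pvKeys tests qs ++ [p.1])
      else pvKeys tests qs := by
  by_cases hp : p.1 ∈ tests
  · rw [if_pos hp]
    unfold pvKeys
    have h1 : List.filter (fun v => decide (v ∈ tests)) (List.map Prod.fst (qs ++ [p])) =
        List.filter (fun v => decide (v ∈ tests)) (List.map Prod.fst qs) ++ [p.1] := by
      simp [List.filter_append, hp]
    rw [h1, pv_dedup_append_singleton]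
  · rw [if_neg hp]
    unfold pvKeys
    have h1 : List.filter (fun v => decide (v ∈ tests)) (List.map Prod.fst (qs ++ [p])) =
        List.filter (fun v => decide (v ∈ tests)) (List.map Prod.fst qs) := by
      simp [List.filter_append, hp]
    rw [h1]

lemma pv_gather_append (qs : List (String × Int)) (p : String × Int) (k : String) :
    pvGather (qs ++ [p]) k = pvGather qs k ++ (if p.1 == k then [p.2] else []) := by
  unfold pvGather
  by_cases h : p.1 == k <;> simp [List.filter_append, h]

lemma pv_mem_keys_tests {tests : List String} {qs : List (String × Int)} {k : String}
    (hk : k ∈ pvKeys tests qs) : k ∈ tests := by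
  unfold pvKeys at hk
  rw [PySem.List.dedup_eq_ofList, PySem.Set.mem_ofList] at hk
  simpa using (List.mem_filter.mp hk).2

lemma pv_keys_nodup (tests : List String) (qs : List (String × Int)) : (pvKeys tests qs).Nodup := by
  unfold pvKeys
  rw [PySem.List.dedup_eq_ofList]
  exact PySem.Set.nodup_ofList _

lemma pv_not_mem_keys_gather {tests : List String} {qs : List (String × Int)} {k : String}
    (hkt : k ∈ tests) (hk : k ∉ pvKeys tests qs) : pvGather qs k = [] := by
  unfold pvGather
  rw [List.map_eq_nil_iff, List.filter_eq_nil_iff]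
  intro q hq hqk
  apply hk
  unfold pvKeys
  rw [PySem.List.dedup_eq_ofList, PySem.Set.mem_ofList, List.mem_filter]
  refine ⟨List.mem_map.mpr ⟨q, hq, by simpa using hqk⟩, by simpa using hkt⟩

lemma pv_items_foldl (tests : List String) (ps : List (String × Int)) :
    (ps.foldl (pvStep tests) PySem.Dict.empty).items
      = (pvKeys tests ps).map (fun k => (k, pvGather ps k)) := by
  induction ps using List.reverseRecOn with
  | nil => rfl
  | append_singleton qs p ih =>
    rw [List.foldl_append, List.foldl_cons, List.foldl_nil]
    set D := qs.foldl (pvStep tests) PySem.Dict.empty with hD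
    have hitems : D.items = (pvKeys tests qs).map (fun k => (k, pvGather qs k)) := ih
    have hkeys : D.keys = pvKeys tests qs := by
      simp [PySem.Dict.keys, hitems, Function.comp_def]
    have hnodup : D.keys.Nodup := by rw [hkeys]; exact pv_keys_nodup _ _
    have hcont : D.contains p.1 = decide (p.1 ∈ pvKeys tests qs) := by
      rw [PySem.Dict.contains_eq_decide_mem_keys, hkeys]
    by_cases hp : p.1 ∈ tests
    · by_cases hmem : p.1 ∈ pvKeys tests qs
      · have hct : D.contains p.1 = true := by simp [hcont, hmem]
        have hgetD : D.getD p.1 [] = pvGather qs p.1 := by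
          refine PySem.Dict.getD_of_mem_items D ?_ hnodup []
          rw [hitems]
          exact List.mem_map.mpr ⟨p.1, hmem, rfl⟩
        unfold pvStep
        rw [if_pos hp, hct, if_neg (by simp), PySem.Dict.modify,
          PySem.Dict.items_insert_of_contains _ _ hct, hitems, List.map_map,
          pv_keys_append, if_pos hp, if_pos (by simpa using hmem)]
        apply List.map_congr_left
        intro k hk
        by_cases hkp : k = p.1
        · subst hkp
          simp [hgetD, pv_gather_append]
        · have hb : (k == p.1) = false := by simpa using hkp
          have hb2 : (p.1 == k) = false := by
            simp only [beq_eq_false_iff_ne]; exact fun h => hkp h.symm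
          simp [Function.comp, hb, hb2, pv_gather_append]
      · have hcf : D.contains p.1 = false := by simp [hcont, hmem]
        have hct' : ((D.insert p.1 ([] : List Int)).contains p.1) = true :=
          PySem.Dict.contains_insert_self _ _ _
        have h1 : (D.insert p.1 ([] : List Int)).getD p.1 [] = [] :=
          PySem.Dict.getD_insert_self _ _ _ _
        unfold pvStep
        rw [if_pos hp, hcf, if_pos rfl, PySem.Dict.modify, h1,
          PySem.Dict.items_insert_of_contains _ _ hct',
          PySem.Dict.items_insert_of_not_contains _ _ hcf, hitems,
          List.map_append, List.map_map,
          pv_keys_append, if_pos hp, if_neg (by simpa using hmem), List.map_append]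
        congr 1
        · apply List.map_congr_left
          intro k hk
          have hkp : k ≠ p.1 := fun h => hmem (h ▸ hk)
          have hb : (k == p.1) = false := by simpa using hkp
          have hb2 : (p.1 == k) = false := by
            simp only [beq_eq_false_iff_ne]; exact fun h => hkp h.symm
          simp [Function.comp, hb, hb2, pv_gather_append]
        · have hg : pvGather qs p.1 = [] := pv_not_mem_keys_gather hp hmem
          simp [pv_gather_append, hg]
    · unfold pvStep
      rw [if_neg hp, hitems, pv_keys_append, if_neg hp]
      apply List.map_congr_left
      intro k hk
      have hkt := pv_mem_keys_tests hk
      have hne : (p.1 == k) = false := by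
        simp only [beq_eq_false_iff_ne]
        exact fun h => hp (h ▸ hkt)
      rw [pv_gather_append, hne, if_neg (by simp), List.append_nil]

lemma pitloop_eq (client competition : Option String) (pit : List (String × List (String × Int))) (tests : List String) :
    pitloop client competition pit tests
      = ((pit.flatMap (fun t => t.2)).foldl (pvStep tests) PySem.Dict.empty).items := by
  unfold pitloop
  rw [pv_foldl_flatMap]
  rfl

theorem pitloop_spec : Claim_equal_pitloop := by
  intro client competition pit tests _
  show pitloop client competition pit tests = pitloop_alt client competition pit tests
  rw [pitloop_eq, pv_items_foldl]
  unfold pitloop_alt pvKeys pvGather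
  rw [List.map_flatMap]
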